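-- pv_equiv track=rewrite | github.com/TieuLongPhan/SynKit | synkit/CRN/hypergraph.py | _normalize_any
-- ===== SOURCE A (Python) =====
-- from typing import (
--     Any,
--     Dict,
--     Iterable,
--     Iterator,
--     List,
--     Mapping,
--     Optional,
--     Set,
--     Tuple,
--     Union,
--     Sequence,
-- )
--
-- def _normalize_any(
--     obj: Union[Mapping[str, int], Iterable[str], Iterable[Tuple[str, int]]],
-- ) -> Dict[str, int]:
--     out: Dict[str, int] = {}
--     if isinstance(obj, Mapping):
--         for k, v in obj.items():
--             s = str(k)
--             c = int(v)
--             if c > 0: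
--                 out[s] = out.get(s, 0) + c
--         return out
--     for item in obj:
--         if isinstance(item, tuple) and len(item) == 2:
--             s, c = item
--             s = str(s)
--             c = int(c)
--             if c > 0:
--                 out[s] = out.get(s, 0) + c
--         else:
--             s = str(item)
--             if s:
--                 out[s] = out.get(s, 0) + 1
--     return out
-- ===== SOURCE B (Python) =====
-- from typing import Mapping
--
--
-- def _normalize_any(obj):
--     # Flatten every accepted shape into a list of (str, int) pairs first.
--     if isinstance(obj, Mapping):
--         pairs = [(str(k), int(v)) for k, v in obj.items()]
--     else:
--         pairs = []
--         for item in obj: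
--             if isinstance(item, tuple) and len(item) == 2:
--                 pairs.append((str(item[0]), int(item[1])))
--             else:
--                 s = str(item)
--                 if s:
--                     pairs.append((s, 1))
--     # Group-by: keep only positive counts, bucket them per key
--     # (first-occurrence order), then sum each bucket.
--     pos = [(s, c) for s, c in pairs if c > 0]
--     buckets = {}
--     for s, c in pos:
--         buckets.setdefault(s, []).append(c)
--     return {k: sum(v) for k, v in buckets.items()}
-- ===== Notes on version B (the rewrite author's own statement) =====
-- stated objective: alternative
-- what changed: A threads one mutable running-total dict through the traversal (out[s]=out.get(s,0)+c per element); B flattens/filters to a list of positive (key,count) pairs, buckets the counts per key into lists, and builds the result by summing each bucket.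
import Mathlib
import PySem

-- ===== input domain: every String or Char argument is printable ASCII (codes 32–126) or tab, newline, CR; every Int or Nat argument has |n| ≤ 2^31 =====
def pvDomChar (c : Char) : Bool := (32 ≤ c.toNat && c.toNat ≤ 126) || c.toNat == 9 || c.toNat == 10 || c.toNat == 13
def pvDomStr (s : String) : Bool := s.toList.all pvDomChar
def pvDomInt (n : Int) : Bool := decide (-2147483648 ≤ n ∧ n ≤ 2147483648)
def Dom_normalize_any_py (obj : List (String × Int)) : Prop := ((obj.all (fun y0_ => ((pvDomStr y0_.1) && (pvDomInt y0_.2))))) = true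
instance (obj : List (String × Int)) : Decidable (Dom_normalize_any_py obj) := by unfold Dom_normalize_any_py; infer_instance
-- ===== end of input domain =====

-- B re-states A's accumulate-into-a-dict loop as a filter + dedup + group-by-sum ("alternative" objective);
-- under the List (String × Int) argument type only the tuple-iterable branch of the Python is reachable.

-- ===== PORT A =====
-- the tuple branch of A's loop: skip c ≤ 0, else out[s] = out.get(s, 0) + c
def normalize_any_py (obj : List (String × Int)) : List (String × Int) :=
  (obj.foldl
    (fun out p => if p.2 > 0 then out.insert p.1 (out.getD p.1 0 + p.2) else out)
    PySem.Dict.empty).items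

-- ===== PORT B =====
-- pos = positive pairs; buckets[s].append(c) via setdefault (= modify with default []); sum each bucket
def normalize_any_py_alt (obj : List (String × Int)) : List (String × Int) :=
  let pos := obj.filter (fun p => decide (p.2 > 0))
  let buckets := pos.foldl (fun d p => d.modify p.1 [] (· ++ [p.2])) PySem.Dict.empty
  buckets.items.map (fun q => (q.1, q.2.sum))

-- ===== PRECONDITION & SPEC =====
def Spec_normalize_any_py (obj : List (String × Int)) (out : List (String × Int)) : Prop := out = normalize_any_py_alt obj
instance (obj : List (String × Int)) (out : List (String × Int)) : Decidable (Spec_normalize_any_py obj out) := by unfold Spec_normalize_any_py; infer_instance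

-- ===== CLAIM (what is proved, stated in full; the proofs are below) =====
def Claim_equal_normalize_any_py : Prop := ∀ (obj : List (String × Int)), Dom_normalize_any_py obj → Spec_normalize_any_py obj (normalize_any_py obj)

-- ===== LEMMAS AND PROOFS =====

-- A's guarded loop only touches the positive pairs: fold over the filtered list instead
theorem foldl_if_pos_eq_foldl_filter (f : PySem.Dict String Int → String × Int → PySem.Dict String Int)
    (xs : List (String × Int)) (d : PySem.Dict String Int) :
    xs.foldl (fun out p => if p.2 > 0 then f out p else out) d
      = (xs.filter (fun p => decide (p.2 > 0))).foldl f d := by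
  induction xs generalizing d with
  | nil => rfl
  | cons x xs ih =>
    simp only [List.foldl_cons, List.filter_cons]
    by_cases h : x.2 > 0 <;> simp [h, ih]

-- the value A's accumulation loop leaves at key k is the sum of matching counts
theorem getD_foldl_insert_add (xs : List (String × Int)) (d : PySem.Dict String Int) (k : String) :
    (xs.foldl (fun out p => out.insert p.1 (out.getD p.1 0 + p.2)) d).getD k 0
      = d.getD k 0 + ((xs.filter (fun p => p.1 == k)).map Prod.snd).sum := by
  induction xs generalizing d with
  | nil => simp
  | cons x xs ih =>
    simp only [List.foldl_cons, List.filter_cons, ih]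
    rw [PySem.Dict.getD_insert]
    by_cases h : x.1 = k
    · simp [h]
      ring
    · simp [h, beq_iff_eq, Ne.symm h]

-- ===== VERDICT (by name: the statement is the Claim_ definition above) =====
theorem normalize_any_py_spec : Claim_equal_normalize_any_py := by
  intro obj _
  unfold Spec_normalize_any_py normalize_any_py normalize_any_py_alt
  dsimp only
  rw [foldl_if_pos_eq_foldl_filter]
  set pos := obj.filter (fun p => decide (p.2 > 0)) with hpos
  -- A's dict: distinct keys in first-occurrence order
  have hndA : (pos.foldl (fun out p => out.insert p.1 (out.getD p.1 0 + p.2)) PySem.Dict.empty).keys.Nodup :=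
    PySem.Dict.nodup_keys_foldl_insert_key pos Prod.fst _ _ (by simp)
  rw [PySem.Dict.items_eq_map_keys _ hndA 0]
  -- B's buckets dict: same keys
  have hndB : (pos.foldl (fun d p => d.modify p.1 [] (· ++ [p.2])) PySem.Dict.empty).keys.Nodup :=
    PySem.Dict.nodup_keys_foldl_modify_key pos Prod.fst [] _ _ (by simp)
  rw [PySem.Dict.items_eq_map_keys _ hndB []]
  have hkA : (pos.foldl (fun out p => out.insert p.1 (out.getD p.1 0 + p.2)) PySem.Dict.empty).keys
      = PySem.Set.ofList (pos.map Prod.fst) := by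
    rw [PySem.Dict.keys_foldl_insert_key, PySem.Dict.keys_empty, PySem.Set.update_nil_left]
  have hkB : (pos.foldl (fun d p => d.modify p.1 [] (· ++ [p.2])) PySem.Dict.empty).keys
      = PySem.Set.ofList (pos.map Prod.fst) := by
    rw [PySem.Dict.keys_foldl_modify_key, PySem.Dict.keys_empty, PySem.Set.update_nil_left]
  rw [hkA, hkB, List.map_map]
  refine List.map_congr_left (fun k _ => ?_)
  simp only [Function.comp]
  rw [getD_foldl_insert_add, PySem.Dict.getD_foldl_modify_append]
  simp
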